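-- pv_equiv track=rewrite | github.com/ayushbansal323/PatCom | module1/Preprocessing and Chi-Square/Read.py | read_claims
-- ===== SOURCE A (Python) =====
-- def read_claims(document):
-- 	claims = []
-- 	indicator = 0
--
-- 	for i in document:
-- 		if(i.find(' claimed ')!=-1):
-- 			indicator = 1
--
-- 		if(indicator):
-- 			claims.append(i)
--
-- 	return claims
-- ===== SOURCE B (Python) =====
-- def read_claims(document):
--     for k, line in enumerate(document):
--         if ' claimed ' in line:
--             return list(document[k:])
--     return []
-- ===== Notes on version B (the rewrite author's own statement) =====
-- stated objective: simpler
-- what changed: Replaces the flag-and-append accumulation pass with locate-the-first-trigger-then-return-the-suffix (enumerate + early return + slice).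
import Mathlib
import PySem

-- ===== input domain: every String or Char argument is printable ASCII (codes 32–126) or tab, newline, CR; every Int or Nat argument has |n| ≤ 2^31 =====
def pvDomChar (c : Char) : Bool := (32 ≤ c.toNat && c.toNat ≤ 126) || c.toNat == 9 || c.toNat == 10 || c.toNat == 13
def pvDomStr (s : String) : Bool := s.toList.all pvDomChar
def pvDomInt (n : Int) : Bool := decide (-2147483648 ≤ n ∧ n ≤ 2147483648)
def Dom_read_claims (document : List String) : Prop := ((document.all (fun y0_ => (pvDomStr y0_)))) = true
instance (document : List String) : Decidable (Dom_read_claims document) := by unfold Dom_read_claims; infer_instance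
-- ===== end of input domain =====

-- B replaces A's flag-and-append pass by locate-first-match-then-return-suffix (simpler decomposition; same cost).

-- ===== PORT A =====
def read_claims (document : List String) : List String :=
  (document.foldl
    (fun (st : List String × Int) i =>
      let indicator := if PySem.Str.find i " claimed " ≠ -1 then 1 else st.2
      if indicator ≠ 0 then (st.1 ++ [i], indicator) else (st.1, indicator))
    ([], 0)).1

-- ===== PORT B =====
def read_claims_go (document : List String) : List (Int × String) → List String
  | [] => []
  | (k, line) :: rest =>
    if PySem.Str.isIn " claimed " line then PySem.List.slice document (some k) none
    else read_claims_go document rest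

def read_claims_alt (document : List String) : List String :=
  read_claims_go document (PySem.List.enumerate document)

-- ===== PRECONDITION & SPEC =====
def Spec_read_claims (document : List String) (out : List String) : Prop := out = read_claims_alt document
instance (document : List String) (out : List String) : Decidable (Spec_read_claims document out) := by unfold Spec_read_claims; infer_instance

-- ===== CLAIM (what is proved, stated in full; the proofs are below) =====
def Claim_equal_read_claims : Prop := ∀ (document : List String), Dom_read_claims document → Spec_read_claims document (read_claims document)

-- ===== LEMMAS AND PROOFS =====

/-- Proof-side characterisation: the suffix from the first line containing " claimed ". -/
def suffixFrom : List String → List String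
  | [] => []
  | i :: rest => if PySem.Str.isIn " claimed " i then i :: rest else suffixFrom rest

def stepA (st : List String × Int) (i : String) : List String × Int :=
  let indicator := if PySem.Str.find i " claimed " ≠ -1 then 1 else st.2
  if indicator ≠ 0 then (st.1 ++ [i], indicator) else (st.1, indicator)

theorem foldl_stepA_one (l : List String) (acc : List String) :
    (l.foldl stepA (acc, 1)).1 = acc ++ l := by
  induction l generalizing acc with
  | nil => simp
  | cons i rest ih =>
    simp only [List.foldl_cons, stepA]
    split_ifs with h1 h2 h2 <;> simp_all [ih]

theorem cond_eq (i : String) :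
    (PySem.Str.find i " claimed " ≠ -1) ↔ PySem.Str.isIn " claimed " i = true := by
  rw [PySem.Str.find_ne_neg_one_iff, PySem.Str.isIn_iff_infix]

theorem foldl_stepA_zero (l : List String) (acc : List String) :
    (l.foldl stepA (acc, 0)).1 = acc ++ suffixFrom l := by
  induction l generalizing acc with
  | nil => simp [suffixFrom]
  | cons i rest ih =>
    rw [List.foldl_cons]
    by_cases h : PySem.Str.find i " claimed " = -1
    · have hb : ¬ PySem.Str.isIn " claimed " i = true := fun hb => ((cond_eq i).mpr hb) h
      simp at h hb
      have hs : stepA (acc, 0) i = (acc, 0) := by simp [stepA, h]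
      rw [hs, ih]
      simp [suffixFrom, hb]
    · have hb : PySem.Str.isIn " claimed " i = true := (cond_eq i).mp h
      have h' : ¬ PySem.Chars.find i.toList [' ','c','l','a','i','m','e','d',' '] = -1 := by simpa using h
      have hb' : PySem.Chars.isIn [' ','c','l','a','i','m','e','d',' '] i.toList = true := by simpa using hb
      have hs : stepA (acc, 0) i = (acc ++ [i], 1) := by simp [stepA, h']
      rw [hs, foldl_stepA_one]
      simp [suffixFrom, hb']

theorem go_eq_suffixFrom (document : List String) :
    ∀ (suf : List String) (k : ℕ), document.drop k = suf →
      read_claims_go document (PySem.List.enumerate suf (k : Int)) = suffixFrom suf := by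
  intro suf
  induction suf with
  | nil => intro k _; simp [read_claims_go, suffixFrom, PySem.List.enumerate_nil]
  | cons i rest ih =>
    intro k hk
    rw [PySem.List.enumerate_cons]
    simp only [read_claims_go, suffixFrom]
    by_cases h : PySem.Str.isIn " claimed " i = true
    · simp only [h, if_true]
      rw [PySem.List.slice_from_natCast, hk]
    · simp only [h, if_false]
      have : document.drop (k + 1) = rest := by
        rw [← List.tail_drop, hk]; rfl
      have hcast : (k : Int) + 1 = ((k + 1 : ℕ) : Int) := by push_cast; ring
      rw [hcast]
      exact ih (k + 1) this

-- ===== VERDICT (by name: the statement is the Claim_ definition above) =====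
theorem read_claims_spec : Claim_equal_read_claims := by
  intro document _
  show read_claims document = read_claims_alt document
  have hA : read_claims document = suffixFrom document := by
    have h0 : read_claims document = (document.foldl stepA ([], 0)).1 := rfl
    rw [h0, foldl_stepA_zero]; simp
  have hB : read_claims_alt document = suffixFrom document := by
    have := go_eq_suffixFrom document document 0 (by simp)
    simpa [read_claims_alt] using this
  rw [hA, hB]
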